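-- pv_equiv track=rewrite | github.com/ztjona/codeforces_solver | 1335C - Two Teams Composing/go.py | solve
-- ===== SOURCE A (Python) =====
-- from collections import Counter
--
-- def solve(nums)->int:
--     '''
--
--     ############################################### '''
--     counter = Counter(nums)
--     n = len(nums)
--
--     mostCommon = counter.most_common()
--     diffs = len(mostCommon)
--     for idx, times in mostCommon:
--         if diffs - 1 >= times:
--             # enough to complete
--             return times
--         if diffs >= times - 1:
--             # needs to pass 1 to the otherside
--             return times - 1
--
--         elif times > diffs:
--             # all the diffs and 1 from the otherside
--             return diffs
--     return 0
-- ===== SOURCE B (Python) =====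
-- def solve(nums) -> int:
--     if not nums:
--         return 0
--     xs = sorted(nums)
--     d = m = run = 1
--     for prev, x in zip(xs, xs[1:]):
--         if x == prev:
--             run += 1
--         else:
--             d += 1
--             run = 1
--         if run > m:
--             m = run
--     return min(d, m, (d + m - 1) // 2)
-- ===== Notes on version B (the rewrite author's own statement) =====
-- stated objective: alternative
-- what changed: Dropped the Counter/most_common machinery entirely: B sorts the raw list, derives the distinct count and maximum run length in one linear scan over adjacent pairs, and returns the branch-free min(d, m, (d+m-1)//2) instead of A's early-return branch chain over most_common().
import Mathlib
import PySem

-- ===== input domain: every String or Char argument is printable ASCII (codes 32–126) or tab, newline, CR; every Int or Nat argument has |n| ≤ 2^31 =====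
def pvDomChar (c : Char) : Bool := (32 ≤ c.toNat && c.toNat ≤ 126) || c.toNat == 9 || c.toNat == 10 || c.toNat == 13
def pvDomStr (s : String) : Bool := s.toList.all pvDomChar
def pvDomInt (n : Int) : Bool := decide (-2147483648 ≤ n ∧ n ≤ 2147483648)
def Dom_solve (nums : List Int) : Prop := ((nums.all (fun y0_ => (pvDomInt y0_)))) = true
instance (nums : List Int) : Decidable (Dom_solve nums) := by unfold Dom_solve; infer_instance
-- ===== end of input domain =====

-- B drops the Counter/most_common machinery: it sorts the raw list, derives the distinct count
-- and the maximum run length in one scan over adjacent pairs, and returns min(d, m, (d+m-1)//2)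
-- (objective: alternative algorithm, same cost).


-- ===== PORT A =====
-- loop 'for idx, times in mostCommon' with its early returns; falls through to 0
def solveLoop : List (Int × Int) → Int → Int
  | [], _ => 0
  | (_, times) :: rest, diffs =>
    if diffs - 1 ≥ times then times
    else if diffs ≥ times - 1 then times - 1
    else if times > diffs then diffs
    else solveLoop rest diffs

def solve (nums : List Int) : Int :=
  -- counter = Counter(nums); mostCommon = counter.most_common(); diffs = len(mostCommon)
  solveLoop (PySem.List.sorted (PySem.Dict.counter nums).items (fun p => p.2) true)
    ((PySem.List.sorted (PySem.Dict.counter nums).items (fun p => p.2) true).length : Int)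

-- ===== PORT B =====
-- loop body: 'if x == prev: run += 1 else: d += 1; run = 1' then 'if run > m: m = run'
-- on state (d, m, run), fed the pair (prev, x)
def stepB (s : Int × Int × Int) (p : Int × Int) : Int × Int × Int :=
  let dr := if p.2 = p.1 then (s.1, s.2.2 + 1) else (s.1 + 1, 1)
  let m := if dr.2 > s.2.1 then dr.2 else s.2.1
  (dr.1, m, dr.2)

def solve_alt (nums : List Int) : Int :=
  -- if not nums: return 0
  if nums = [] then 0
  else
    -- xs = sorted(nums); d = m = run = 1; for prev, x in zip(xs, xs[1:]): …
    let xs := PySem.List.sorted nums (fun x => x) false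
    let s := (xs.zip (PySem.List.slice xs (some 1) none)).foldl stepB (1, 1, 1)
    -- min(d, m, (d + m - 1) // 2)
    min (min s.1 s.2.1) (PySem.Int.floordiv (s.1 + s.2.1 - 1) 2)

-- ===== PRECONDITION & SPEC =====
def Spec_solve (nums : List Int) (out : Int) : Prop := out = solve_alt nums
instance (nums : List Int) (out : Int) : Decidable (Spec_solve nums out) := by unfold Spec_solve; infer_instance

-- ===== CLAIM =====
def Claim_equal_solve : Prop := ∀ (nums : List Int), Dom_solve nums → Spec_solve nums (solve nums)

-- ===== LEMMAS AND PROOFS =====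

-- "m is the maximum multiplicity occurring in l"
def MaxC (l : List Int) (m : Int) : Prop :=
  (∃ x ∈ l, (l.count x : Int) = m) ∧ ∀ x ∈ l, (l.count x : Int) ≤ m

theorem mem_le_getLast : ∀ (q : List Int) (hq : q ≠ []), q.Pairwise (· ≤ ·) →
    ∀ (x : Int), x ∈ q → x ≤ q.getLast hq
  | [a], _, _, x, hx => by simp at hx; simp [hx]
  | a :: b :: t, _, hs, x, hx => by
    rw [List.pairwise_cons] at hs
    rw [List.getLast_cons (by simp)]
    rcases List.mem_cons.mp hx with rfl | hx'
    · exact hs.1 _ (List.getLast_mem _)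
    · exact mem_le_getLast (b :: t) (by simp) hs.2 x hx'


theorem scan_inv : ∀ (l : List Int), ∀ (q : List Int) (hq : q ≠ []) (s : Int × Int × Int),
    (q ++ l).Pairwise (· ≤ ·) →
    s.1 = (q.toFinset.card : Int) → MaxC q s.2.1 → s.2.2 = (q.count (q.getLast hq) : Int) →
    (((q.getLast hq :: l).zip l).foldl stepB s).1 = ((q ++ l).toFinset.card : Int) ∧
      MaxC (q ++ l) (((q.getLast hq :: l).zip l).foldl stepB s).2.1
  | [], q, hq, s, hp, h1, h2, h3 => by
    simpa using ⟨h1, h2⟩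
  | b :: t, q, hq, s, hp, h1, h2, h3 => by
    have happ : q ++ b :: t = (q ++ [b]) ++ t := by simp
    rw [List.zip_cons_cons, List.foldl_cons, happ]
    have hqb' : (q ++ [b]) ≠ [] := by simp
    have hlast' : (q ++ [b]).getLast hqb' = b := by simp
    have hpair_q : q.Pairwise (· ≤ ·) := (List.pairwise_append.mp hp).1
    have hqb : ∀ x ∈ q, x ≤ b := fun x hx =>
      (List.pairwise_append.mp hp).2.2 x hx b (by simp)
    obtain ⟨⟨x0, hx0, hc0⟩, hub⟩ := h2
    have hcnt : ∀ x : Int, (q ++ [b]).count x = q.count x + if x = b then 1 else 0 := by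
      intro x
      by_cases hxb : x = b
      · subst hxb; simp [List.count_append]
      · simp [List.count_append, hxb, Ne.symm hxb]
    have key : (stepB s (q.getLast hq, b)).1 = ((q ++ [b]).toFinset.card : Int) ∧
        MaxC (q ++ [b]) (stepB s (q.getLast hq, b)).2.1 ∧
        (stepB s (q.getLast hq, b)).2.2 = (((q ++ [b]).count ((q ++ [b]).getLast hqb')) : Int) := by
      by_cases h : b = q.getLast hq
      · -- same run continues
        have hstep : stepB s (q.getLast hq, b) =
            (s.1, if s.2.2 + 1 > s.2.1 then s.2.2 + 1 else s.2.1, s.2.2 + 1) := by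
          simp [stepB, h]
        have hbq : b ∈ q := h ▸ List.getLast_mem hq
        have h3b : s.2.2 = (q.count b : Int) := by rw [h]; exact h3
        have htf : (q ++ [b]).toFinset = q.toFinset := by
          ext x
          simp only [List.toFinset_append, Finset.mem_union, List.mem_toFinset,
            List.toFinset_cons, List.toFinset_nil, insert_empty_eq, Finset.mem_singleton]
          constructor
          · rintro (hx | rfl) <;> [exact hx; exact hbq]
          · exact Or.inl
        have hcb : ((q ++ [b]).count b : Int) = s.2.2 + 1 := by
          rw [hcnt b, if_pos rfl, h3b]; push_cast; ring
        have hrle : s.2.2 ≤ s.2.1 := by rw [h3b]; exact hub b hbq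
        rw [hstep]
        refine ⟨by simp [htf, h1], ⟨?_, ?_⟩, by rw [hlast']; exact hcb.symm⟩
        · by_cases hgt : s.2.2 + 1 > s.2.1
          · exact ⟨b, by simp, by rw [if_pos hgt]; exact hcb⟩
          · have hx0a : x0 ≠ b := by
              intro heq; rw [heq, ← h3b] at hc0; omega
            refine ⟨x0, by simp [hx0], ?_⟩
            rw [hcnt x0, if_neg hx0a]
            simpa [hgt] using hc0
        · intro x hx
          rw [hcnt x]
          by_cases hxb : x = b
          · subst hxb
            rw [if_pos rfl]
            have : (q.count x : Int) = s.2.2 := h3b.symm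
            split_ifs <;> push_cast <;> omega
          · rw [if_neg hxb]
            have hxq : x ∈ q := by
              rcases List.mem_append.mp hx with h' | h'
              · exact h'
              · simp at h'; exact absurd h' hxb
            have := hub x hxq
            split_ifs <;> push_cast <;> omega
      · -- new distinct value
        have hstep : stepB s (q.getLast hq, b) =
            (s.1 + 1, if 1 > s.2.1 then 1 else s.2.1, 1) := by
          simp [stepB, h]
        have hbq : b ∉ q := fun hb =>
          h (le_antisymm (mem_le_getLast q hq hpair_q b hb) (hqb _ (List.getLast_mem hq)))
        have h0 : q.count b = 0 := List.count_eq_zero_of_not_mem hbq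
        have hm1 : (1 : Int) ≤ s.2.1 := by
          have := hub x0 hx0
          have hpos : 0 < q.count x0 := List.count_pos_iff.mpr hx0
          omega
        have hmgt : ¬ ((1:Int) > s.2.1) := by omega
        have hcb : ((q ++ [b]).count b : Int) = 1 := by
          rw [hcnt b, if_pos rfl, h0]; simp
        rw [hstep]
        refine ⟨?_, ⟨?_, ?_⟩, by rw [hlast']; rw [if_neg hmgt]; exact hcb.symm⟩
        · have : (q ++ [b]).toFinset = insert b q.toFinset := by
            simp [List.toFinset_append]
          rw [this, Finset.card_insert_of_notMem (by simpa using hbq), h1]; push_cast; ring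
        · refine ⟨x0, by simp [hx0], ?_⟩
          rw [hcnt x0, if_neg (fun hh => hbq (by rw [← hh]; exact hx0)), if_neg hmgt]
          simpa using hc0
        · intro x hx
          rw [hcnt x, if_neg hmgt]
          by_cases hxb : x = b
          · subst hxb
            rw [if_pos rfl, h0]
            simpa using hm1
          · rw [if_neg hxb]
            have hxq : x ∈ q := by
              rcases List.mem_append.mp hx with h' | h'
              · exact h'
              · simp at h'; exact absurd h' hxb
            simpa using hub x hxq
    have hpair' : ((q ++ [b]) ++ t).Pairwise (· ≤ ·) := by rw [← happ]; exact hp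
    have := scan_inv t (q ++ [b]) hqb' (stepB s (q.getLast hq, b)) hpair'
      key.1 key.2.1 key.2.2
    rw [hlast'] at this
    exact this

theorem solveLoop_cons (k times : Int) (rest : List (Int × Int)) (diffs : Int) :
    solveLoop ((k, times) :: rest) diffs =
      if diffs - 1 ≥ times then times
      else if diffs ≥ times - 1 then times - 1
      else diffs := by
  simp only [solveLoop]
  split_ifs with h1 h2 h3 <;> try rfl
  omega

theorem ofList_toFinset (nums : List Int) :
    (PySem.Set.ofList nums).toFinset = nums.toFinset := by
  ext x; simp [List.mem_toFinset, PySem.Set.mem_ofList]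

theorem ofList_length (nums : List Int) :
    (PySem.Set.ofList nums).length = nums.toFinset.card := by
  rw [← ofList_toFinset, List.toFinset_card_of_nodup (PySem.Set.nodup_ofList nums)]

-- ===== VERDICT =====
theorem solve_spec : Claim_equal_solve := by
  intro nums _
  unfold Spec_solve
  by_cases hne : nums = []
  · subst hne; decide
  · unfold solve
    -- A side
    have hitems : (PySem.Dict.counter nums).items
        = (PySem.Set.ofList nums).map (fun k => (k, (nums.count k : Int))) :=
      PySem.Dict.items_counter nums
    obtain ⟨n0, nt, rfl⟩ := List.exists_cons_of_ne_nil hne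
    set nums := n0 :: nt
    have hn0 : n0 ∈ PySem.Set.ofList nums := (PySem.Set.mem_ofList _ _).mpr (by simp [nums])
    rcases hs : PySem.List.sorted (PySem.Dict.counter nums).items (fun p => p.2) true with
      _ | ⟨⟨k, M⟩, t⟩
    · exfalso
      have : (PySem.Dict.counter nums).items = [] :=
        (PySem.List.sorted_eq_nil_iff _ _ _).mp hs
      rw [hitems] at this
      have h0 : PySem.Set.ofList nums = [] := List.map_eq_nil_iff.mp this
      rw [h0] at hn0
      simp at hn0
    · have hperm := PySem.List.sorted_perm (PySem.Dict.counter nums).items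
        (fun p : Int × Int => p.2) true
      rw [hs] at hperm
      have hlen : (PySem.Dict.counter nums).items.length = t.length + 1 := by
        simpa using hperm.length_eq.symm
      have hmem : (k, M) ∈ (PySem.Dict.counter nums).items :=
        hperm.mem_iff.mp (List.mem_cons_self ..)
      have hge : ∀ y ∈ (PySem.Dict.counter nums).items, y.2 ≤ M := by
        intro y hy
        exact PySem.List.key_head_sorted_rev_ge _ _ hs y hy
      -- translate to MaxC nums M
      have hMC : MaxC nums M := by
        constructor
        · rw [hitems] at hmem
          obtain ⟨x, hx, hxe⟩ := List.mem_map.mp hmem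
          refine ⟨x, (PySem.Set.mem_ofList _ _).mp hx, ?_⟩
          have := congrArg Prod.snd hxe
          simpa using this
        · intro x hx
          have hx' : x ∈ PySem.Set.ofList nums := (PySem.Set.mem_ofList _ _).mpr hx
          have : (x, (nums.count x : Int)) ∈ (PySem.Dict.counter nums).items := by
            rw [hitems]; exact List.mem_map.mpr ⟨x, hx', rfl⟩
          simpa using hge _ this
      have hd : ((PySem.Dict.counter nums).items.length : Int) = (nums.toFinset.card : Int) := by
        rw [hitems]; simp [ofList_length]
      -- B side
      have hysne : PySem.List.sorted nums (fun x => x) false ≠ [] := by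
        simp [PySem.List.sorted_eq_nil_iff, nums]
      obtain ⟨y, yt, hys⟩ := List.exists_cons_of_ne_nil hysne
      have hpw : (([y] ++ yt)).Pairwise (· ≤ ·) := by
        rw [List.singleton_append, ← hys]
        exact PySem.List.sorted_pairwise nums (fun x => x)
      have hscan := scan_inv yt [y] (by simp) (1, 1, 1) hpw (by simp)
        ⟨⟨y, by simp, by simp⟩, by intro x hx; simp at hx; simp [hx]⟩ (by simp)
      rw [show ([y].getLast (by simp) : Int) = y from rfl] at hscan
      have hperm2 : (PySem.List.sorted nums (fun x => x) false).Perm nums :=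
        PySem.List.sorted_perm nums (fun x => x) false
      rw [hys] at hperm2
      have htf2 : ([y] ++ yt).toFinset = nums.toFinset := by
        rw [List.singleton_append]
        ext x
        rw [List.mem_toFinset, List.mem_toFinset, ← hperm2.mem_iff]
      -- the fold in solve_alt
      have hslice : PySem.List.slice (y :: yt) (some 1) none = yt := by
        simpa using PySem.List.slice_from_one (y :: yt)
      have halt : solve_alt nums =
          (fun s : Int × Int × Int =>
            min (min s.1 s.2.1) (PySem.Int.floordiv (s.1 + s.2.1 - 1) 2))
            (((y :: yt).zip yt).foldl stepB (1, 1, 1)) := by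
        unfold solve_alt
        rw [if_neg hne, hys]
        exact congrArg (fun l : List Int =>
          (fun s : Int × Int × Int =>
            min (min s.1 s.2.1) (PySem.Int.floordiv (s.1 + s.2.1 - 1) 2))
            (((y :: yt).zip l).foldl stepB (1, 1, 1))) hslice
      rw [halt]
      set F := (((y :: yt).zip yt).foldl stepB (1, 1, 1)) with hF
      have hF1 : F.1 = (nums.toFinset.card : Int) := by
        rw [hscan.1, htf2]
      have hFM : MaxC nums F.2.1 := by
        have h2 := hscan.2
        obtain ⟨⟨x1, hx1, hc1⟩, hub1⟩ := h2
        constructor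
        · exact ⟨x1, hperm2.subset (by simpa using hx1), by
            rw [← hperm2.count_eq]; simpa using hc1⟩
        · intro x hx
          have := hub1 x (by simpa using hperm2.mem_iff.mpr hx)
          rwa [List.singleton_append, hperm2.count_eq] at this
      -- M = F.2.1
      obtain ⟨⟨xa, hxa, hca⟩, huba⟩ := hMC
      obtain ⟨⟨xb, hxb, hcb⟩, hubb⟩ := hFM
      have hMeq : M = F.2.1 := le_antisymm (by rw [← hca]; exact hubb xa hxa) (by rw [← hcb]; exact huba xb hxb)
      -- bounds
      have hM1 : 1 ≤ M := by
        have : 0 < nums.count xa := List.count_pos_iff.mpr hxa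
        omega
      have hd1 : 1 ≤ nums.toFinset.card := by
        refine Finset.card_pos.mpr ⟨n0, ?_⟩
        simp [nums]
      -- arithmetic
      rw [solveLoop_cons]
      have hlen2 : ((((k, M) :: t).length : Nat) : Int) = (nums.toFinset.card : Int) := by
        rw [← hd, hlen]; simp
      rw [hlen2]
      show _ = min (min F.1 F.2.1) (PySem.Int.floordiv (F.1 + F.2.1 - 1) 2)
      rw [hF1, ← hMeq, PySem.Int.floordiv_eq_ediv_of_pos (by omega : (0:Int) < 2)]
      split_ifs <;> omega
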